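-- pv_equiv track=rewrite | github.com/ghumash/ceiling-calculator-bot | app/bot/handlers/calculation.py | get_dynamic_step
-- ===== SOURCE A (Python) =====
-- def get_dynamic_step(base_step: int, selected_lighting: set[str] | None, lighting_type: str) -> int:
--     """Возвращает номер шага для типа освещения с учётом выбора.
--
--     Args:
--         base_step: Номер шага выбора освещения (STEP_LIGHTING_TYPES)
--         selected_lighting: Выбранные типы освещения
--         lighting_type: Тип освещения ('spotlights', 'tracks', 'track_length', 'light_lines', 'chandeliers', 'wall_finish')
--     """
--     if selected_lighting is None:
--         # Режим "Все по шагам" — фиксированные номера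
--         mapping = {
--             "spotlights": 6,
--             "tracks": 7,
--             "track_length": 8,
--             "light_lines": 9,
--             "chandeliers": 10,
--             "wall_finish": 11,
--         }
--         return mapping.get(lighting_type, base_step + 1)
--
--     step = base_step
--     order = ["spotlights", "tracks", "track_length", "light_lines", "chandeliers", "wall_finish"]
--
--     for lt in order:
--         if lt == lighting_type:
--             return step + 1
--         if lt == "track_length":
--             if "tracks" in selected_lighting:
--                 step += 1
--         elif lt == "wall_finish":
--             step += 1
--         elif lt in selected_lighting:
--             step += 1
--
--     return step + 1
-- ===== SOURCE B (Python) =====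
-- def get_dynamic_step(base_step: int, selected_lighting: set[str] | None, lighting_type: str) -> int:
--     if selected_lighting is None:
--         mapping = {
--             "spotlights": 6,
--             "tracks": 7,
--             "track_length": 8,
--             "light_lines": 9,
--             "chandeliers": 10,
--             "wall_finish": 11,
--         }
--         return mapping.get(lighting_type, base_step + 1)
--
--     order = ["spotlights", "tracks", "track_length", "light_lines", "chandeliers", "wall_finish"]
--     contribs = [
--         1 if lt == "wall_finish"
--         else (1 if "tracks" in selected_lighting else 0) if lt == "track_length"
--         else (1 if lt in selected_lighting else 0)
--         for lt in order
--     ]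
--     idx = order.index(lighting_type) if lighting_type in order else len(order)
--     return base_step + 1 + sum(contribs[:idx])
-- ===== Notes on version B (the rewrite author's own statement) =====
-- stated objective: alternative
-- what changed: Replaces A's short-circuit accumulation loop (mutating step and returning mid-loop) with a build-table-then-prefix-sum shape: compute the per-item contribution list over the fixed order, find the cutoff index of lighting_type (length if absent), and return base_step + 1 + sum of contributions before the cutoff.
import Mathlib
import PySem

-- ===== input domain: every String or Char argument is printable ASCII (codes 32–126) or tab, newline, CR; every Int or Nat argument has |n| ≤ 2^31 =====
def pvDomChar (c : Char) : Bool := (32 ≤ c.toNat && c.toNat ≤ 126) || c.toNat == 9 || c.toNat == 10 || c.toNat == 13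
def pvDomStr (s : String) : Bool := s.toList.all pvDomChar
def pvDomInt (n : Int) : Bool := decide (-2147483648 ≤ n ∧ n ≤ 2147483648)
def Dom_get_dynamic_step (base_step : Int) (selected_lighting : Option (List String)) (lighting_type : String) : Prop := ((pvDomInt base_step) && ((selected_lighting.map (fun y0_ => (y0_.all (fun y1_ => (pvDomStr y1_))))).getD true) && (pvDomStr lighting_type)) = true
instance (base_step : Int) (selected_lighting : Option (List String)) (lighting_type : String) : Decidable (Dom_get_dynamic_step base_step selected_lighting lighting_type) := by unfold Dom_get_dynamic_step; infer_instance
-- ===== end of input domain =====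

-- B replaces A's short-circuit accumulation loop with a build-contribution-table-then-prefix-sum
-- shape (same O(1) cost over the fixed 6-item order): a different decomposition, not faster.

-- ===== PORT A =====
-- the fixed order list of A's loop
def pvOrder : List String :=
  ["spotlights", "tracks", "track_length", "light_lines", "chandeliers", "wall_finish"]

-- A's loop over `order` with the mutable `step`; falls through to `step + 1`
def pvLoopA (sel : List String) (lighting_type : String) : List String → Int → Int
  | [], step => step + 1
  | lt :: rest, step =>
    if lt == lighting_type then step + 1
    else if lt == "track_length" then
      pvLoopA sel lighting_type rest (if sel.contains "tracks" then step + 1 else step)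
    else if lt == "wall_finish" then
      pvLoopA sel lighting_type rest (step + 1)
    else if sel.contains lt then
      pvLoopA sel lighting_type rest (step + 1)
    else
      pvLoopA sel lighting_type rest step

def get_dynamic_step (base_step : Int) (selected_lighting : Option (List String)) (lighting_type : String) : Int :=
  match selected_lighting with
  | none =>
    let mapping : PySem.Dict String Int :=
      PySem.Dict.ofList [("spotlights", 6), ("tracks", 7), ("track_length", 8),
                         ("light_lines", 9), ("chandeliers", 10), ("wall_finish", 11)]
    mapping.getD lighting_type (base_step + 1)
  | some sel => pvLoopA sel lighting_type pvOrder base_step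

-- ===== PORT B =====
def get_dynamic_step_alt (base_step : Int) (selected_lighting : Option (List String)) (lighting_type : String) : Int :=
  match selected_lighting with
  | none =>
    let mapping : PySem.Dict String Int :=
      PySem.Dict.ofList [("spotlights", 6), ("tracks", 7), ("track_length", 8),
                         ("light_lines", 9), ("chandeliers", 10), ("wall_finish", 11)]
    mapping.getD lighting_type (base_step + 1)
  | some sel =>
    let order : List String :=
      ["spotlights", "tracks", "track_length", "light_lines", "chandeliers", "wall_finish"]
    let contribs : List Int := order.map (fun lt =>
      if lt == "wall_finish" then 1
      else if lt == "track_length" then (if sel.contains "tracks" then 1 else 0)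
      else if sel.contains lt then 1 else 0)
    let idx : Nat := (PySem.List.index? order lighting_type).getD order.length
    base_step + 1 + (contribs.take idx).sum

-- ===== PRECONDITION & SPEC =====
def Spec_get_dynamic_step (base_step : Int) (selected_lighting : Option (List String)) (lighting_type : String) (out : Int) : Prop := out = get_dynamic_step_alt base_step selected_lighting lighting_type
instance (base_step : Int) (selected_lighting : Option (List String)) (lighting_type : String) (out : Int) : Decidable (Spec_get_dynamic_step base_step selected_lighting lighting_type out) := by unfold Spec_get_dynamic_step; infer_instance

-- ===== CLAIM (what is proved, stated in full; the proofs are below) =====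
def Claim_equal_get_dynamic_step : Prop := ∀ (base_step : Int) (selected_lighting : Option (List String)) (lighting_type : String), Dom_get_dynamic_step base_step selected_lighting lighting_type → Spec_get_dynamic_step base_step selected_lighting lighting_type (get_dynamic_step base_step selected_lighting lighting_type)

-- ===== LEMMAS AND PROOFS =====
-- per-item contribution of A's loop body (matches B's table entries)
def pvContrib (sel : List String) (lt : String) : Int :=
  if lt == "wall_finish" then 1
  else if lt == "track_length" then (if sel.contains "tracks" then 1 else 0)
  else if sel.contains lt then 1 else 0

-- A's loop computes step + 1 + the prefix sum of contributions up to lighting_type's index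
theorem pvLoopA_eq (sel : List String) (t : String) :
    ∀ (l : List String) (step : Int),
      pvLoopA sel t l step
        = step + 1 + ((l.map (pvContrib sel)).take ((PySem.List.index? l t).getD l.length)).sum := by
  intro l
  induction l with
  | nil => intro step; simp [pvLoopA]
  | cons lt rest ih =>
    intro step
    by_cases h : lt = t
    · subst h
      rw [PySem.List.index?_cons_self]
      simp [pvLoopA]
    · have hb : (lt == t) = false := by simp [h]
      have hstep : pvLoopA sel t (lt :: rest) step
          = pvLoopA sel t rest (step + pvContrib sel lt) := by
        simp only [pvLoopA, hb, Bool.false_eq_true, if_false, pvContrib]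
        split_ifs <;> simp_all
      rw [hstep, ih]
      rw [PySem.List.index?_cons_of_ne rest h]
      cases hi : PySem.List.index? rest t <;>
        simp [List.take_succ_cons, List.sum_cons] <;> omega

theorem get_dynamic_step_agree (base_step : Int) (selected_lighting : Option (List String)) (lighting_type : String) :
    get_dynamic_step base_step selected_lighting lighting_type
      = get_dynamic_step_alt base_step selected_lighting lighting_type := by
  cases selected_lighting with
  | none => rfl
  | some sel =>
    simp only [get_dynamic_step, get_dynamic_step_alt, pvOrder]
    rw [pvLoopA_eq sel lighting_type]
    rfl

-- ===== VERDICT (by name: the statement is the Claim_ definition above) =====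
theorem get_dynamic_step_spec : Claim_equal_get_dynamic_step :=
  fun b s lt _ => get_dynamic_step_agree b s lt
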